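-- pv_equiv track=rewrite | github.com/BryantYuan/python-challenges | senior/2020/escape_room.py | doCheckCanEscape
-- ===== SOURCE A (Python) =====
-- def doCheckCanEscape(row: int, col: int, graph: list, locations: dict) -> bool:
--     if row < 0 or col < 0 or row > len(graph) or col > len(graph[0]):
--         return False
--
--     if row == 1 or col == 1:
--         return True
--
--     val: int = row * col
--
--     try:
--         outputs: list = locations[val]
--     except KeyError:
--         return False
--
--     if len(outputs) != 0:
--         for output in outputs:
--             found: bool = doCheckCanEscape(output[0], output[1], graph, locations)
--             if found:
--                 return True
--
--     return False
-- ===== SOURCE B (Python) =====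
-- def doCheckCanEscape(row: int, col: int, graph: list, locations: dict) -> bool:
--     # Memoized DFS: each (row, col) state is solved at most once; a result
--     # cache replaces A's re-exploration of shared substructure.
--     memo: dict = {}
--
--     def solve(r: int, c: int) -> bool:
--         if (r, c) in memo:
--             return memo[(r, c)]
--         if r < 0 or c < 0 or r > len(graph) or c > len(graph[0]):
--             res = False
--         elif r == 1 or c == 1:
--             res = True
--         else:
--             res = any(solve(out[0], out[1]) for out in locations.get(r * c, []))
--         memo[(r, c)] = res
--         return res
--
--     return solve(row, col)
-- ===== Notes on version B (the rewrite author's own statement) =====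
-- stated objective: alternative
-- what changed: B replaces A's plain recursive DFS (which may re-explore the same (row,col) state many times) by a memoized DFS that caches the result of every solved state, so each state is solved at most once.
-- outside the precondition, e.g. on doCheckCanEscape(2, 2, [[0, 0, 0], [0, 0, 0], [0, 0, 0]], {4: [[1, 2], [2, 2]]}): A returns True, B returns True; on doCheckCanEscape(2, 2, [[0, 0, 0], [0, 0, 0], [0, 0, 0]], {4: [[1, 2], [5]]}): A returns True, B returns True
import Mathlib
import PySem

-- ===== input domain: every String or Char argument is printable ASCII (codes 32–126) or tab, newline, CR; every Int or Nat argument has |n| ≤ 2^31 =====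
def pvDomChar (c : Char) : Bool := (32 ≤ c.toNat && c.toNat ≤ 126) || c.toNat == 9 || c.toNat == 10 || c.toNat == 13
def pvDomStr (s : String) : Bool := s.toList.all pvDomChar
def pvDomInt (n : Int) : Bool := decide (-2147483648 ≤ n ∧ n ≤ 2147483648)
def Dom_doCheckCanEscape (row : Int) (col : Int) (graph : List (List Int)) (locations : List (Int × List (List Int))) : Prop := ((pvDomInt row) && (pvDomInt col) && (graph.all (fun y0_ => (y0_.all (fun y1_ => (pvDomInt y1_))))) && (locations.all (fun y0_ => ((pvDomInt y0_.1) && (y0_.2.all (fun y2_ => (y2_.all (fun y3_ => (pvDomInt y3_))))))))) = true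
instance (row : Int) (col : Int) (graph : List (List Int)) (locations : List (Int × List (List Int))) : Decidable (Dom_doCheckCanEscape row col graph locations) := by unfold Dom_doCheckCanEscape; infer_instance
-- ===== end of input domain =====

-- B replaces A's plain recursive DFS by a memoized DFS (each (row,col) state solved at most once); objective: alternative.

-- ===== PORT A =====
-- shared guard expression `row < 0 or col < 0 or row > len(graph) or col > len(graph[0])`
def pvBlocked (graph : List (List Int)) (r : Int) (c : Int) : Bool :=
  decide (r < 0 ∨ c < 0 ∨ r > (graph.length : Int) ∨ c > ((((PySem.List.pyGet? graph 0).getD [])).length : Int))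

-- output[0] / output[1]; total via getD, exact whenever the list has length ≥ 2 (Pre_)
def pvOut0 (out : List Int) : Int := (PySem.List.pyGet? out 0).getD 0
def pvOut1 (out : List Int) : Int := (PySem.List.pyGet? out 1).getD 0
def pvChildPair (out : List Int) : Int × Int := (pvOut0 out, pvOut1 out)

-- `locations[r*c]` of a state, [] when the key is absent
def pvOuts (locations : List (Int × List (List Int))) (s : Int × Int) : List (List Int) :=
  (PySem.Dict.get? (PySem.Dict.mk locations) (s.1 * s.2)).getD []

-- the child states a state recurses into (both ports and Pre_ use this)
def pvKids (graph : List (List Int)) (locations : List (Int × List (List Int))) (s : Int × Int) : List (Int × Int) :=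
  if pvBlocked graph s.1 s.2 = true ∨ s.1 = 1 ∨ s.2 = 1 then []
  else (pvOuts locations s).map pvChildPair

-- every state the recursion can ever mention: the start plus all output pairs
def pvUniv (row : Int) (col : Int) (locations : List (Int × List (List Int))) : List (Int × Int) :=
  (row, col) :: locations.flatMap (fun p => p.2.map pvChildPair)

-- one closure step of the child relation, and its bounded iteration (fixpoint after pvN steps)
def pvStep (graph : List (List Int)) (locations : List (Int × List (List Int))) (S : List (Int × Int)) : List (Int × Int) :=
  (S ++ S.flatMap (pvKids graph locations)).dedup

def pvCl (graph : List (List Int)) (locations : List (Int × List (List Int))) : Nat → List (Int × Int) → List (Int × Int)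
  | 0, seeds => seeds.dedup
  | n + 1, seeds => pvStep graph locations (pvCl graph locations n seeds)

def pvN (row : Int) (col : Int) (locations : List (Int × List (List Int))) : Nat :=
  (pvUniv row col locations).length + 1

-- the states reachable from the start
def pvReach (row : Int) (col : Int) (graph : List (List Int)) (locations : List (Int × List (List Int))) : List (Int × Int) :=
  pvCl graph locations (pvN row col locations) [(row, col)]

-- A's recursion, fuel-guarded for totality only; within Pre_ the fuel pvN is never exhausted
def pvGoA (graph : List (List Int)) (locations : List (Int × List (List Int))) : Nat → Int → Int → Bool
  | 0, _, _ => false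
  | fuel+1, row, col =>
    if pvBlocked graph row col then false
    else if row = 1 ∨ col = 1 then true
    else
      match PySem.Dict.get? (PySem.Dict.mk locations) (row * col) with
      | none => false
      | some outputs =>
        outputs.any (fun out => pvGoA graph locations fuel (pvOut0 out) (pvOut1 out))

def doCheckCanEscape (row : Int) (col : Int) (graph : List (List Int)) (locations : List (Int × List (List Int))) : Bool :=
  pvGoA graph locations (pvN row col locations) row col

-- ===== PORT B =====
-- memoized DFS: `solve` with the memo dict threaded through; fuel is a totality guard only
mutual
def pvSolve (graph : List (List Int)) (locations : List (Int × List (List Int))) :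
    Nat → Int → Int → PySem.Dict (Int × Int) Bool → Bool × PySem.Dict (Int × Int) Bool
  | 0, _, _, m => (false, m)
  | fuel+1, r, c, m =>
    match PySem.Dict.get? m (r, c) with
    | some b => (b, m)
    | none =>
      let p : Bool × PySem.Dict (Int × Int) Bool :=
        if pvBlocked graph r c then (false, m)
        else if r = 1 ∨ c = 1 then (true, m)
        else pvSolveAny graph locations fuel ((PySem.Dict.get? (PySem.Dict.mk locations) (r * c)).getD []) m
      (p.1, PySem.Dict.insert p.2 (r, c) p.1)
termination_by fuel r c m => (fuel, 0)

-- `any(solve(out[0], out[1]) for out in …)` with the memo threaded left to right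
def pvSolveAny (graph : List (List Int)) (locations : List (Int × List (List Int))) :
    Nat → List (List Int) → PySem.Dict (Int × Int) Bool → Bool × PySem.Dict (Int × Int) Bool
  | _, [], m => (false, m)
  | fuel, out :: rest, m =>
    let p := pvSolve graph locations fuel (pvOut0 out) (pvOut1 out) m
    if p.1 then (true, p.2) else pvSolveAny graph locations fuel rest p.2
termination_by fuel l m => (fuel, l.length + 1)
end

def doCheckCanEscape_alt (row : Int) (col : Int) (graph : List (List Int)) (locations : List (Int × List (List Int))) : Bool :=
  (pvSolve graph locations (pvN row col locations) row col PySem.Dict.empty).1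

-- membership in one closure step
theorem pv_mem_step (graph : List (List Int)) (locations : List (Int × List (List Int)))
    (S : List (Int × Int)) (x : Int × Int) :
    x ∈ pvStep graph locations S ↔ x ∈ S ∨ ∃ s ∈ S, x ∈ pvKids graph locations s := by
  simp [pvStep, List.mem_dedup, List.mem_append, List.mem_flatMap]

theorem pv_cl_nodup (graph : List (List Int)) (locations : List (Int × List (List Int)))
    (n : Nat) (seeds : List (Int × Int)) : (pvCl graph locations n seeds).Nodup := by
  cases n <;> exact List.nodup_dedup _

theorem pv_cl_subset_succ (graph : List (List Int)) (locations : List (Int × List (List Int)))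
    (n : Nat) (seeds : List (Int × Int)) :
    pvCl graph locations n seeds ⊆ pvCl graph locations (n + 1) seeds := by
  intro x hx
  exact (pv_mem_step graph locations _ x).2 (Or.inl hx)

theorem pv_seeds_subset_cl (graph : List (List Int)) (locations : List (Int × List (List Int)))
    (n : Nat) (seeds : List (Int × Int)) : seeds ⊆ pvCl graph locations n seeds := by
  induction n with
  | zero => exact List.subset_dedup seeds
  | succ n ih => exact ih.trans (pv_cl_subset_succ graph locations n seeds)

-- the closure is the least children-closed superset of the seeds
theorem pv_cl_subset_of_closed (graph : List (List Int)) (locations : List (Int × List (List Int)))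
    (C : List (Int × Int)) (seeds : List (Int × Int)) (hseed : seeds ⊆ C)
    (hcl : ∀ s ∈ C, pvKids graph locations s ⊆ C) (n : Nat) :
    pvCl graph locations n seeds ⊆ C := by
  induction n with
  | zero => exact (List.dedup_subset seeds).trans hseed
  | succ n ih =>
    intro x hx
    rcases (pv_mem_step graph locations _ x).1 hx with h | ⟨s, hs, hk⟩
    · exact ih h
    · exact hcl s (ih hs) hk

theorem pv_kids_subset_univ (row : Int) (col : Int) (graph : List (List Int))
    (locations : List (Int × List (List Int))) (s : Int × Int) :
    pvKids graph locations s ⊆ pvUniv row col locations := by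
  intro x hx
  unfold pvKids at hx
  split at hx
  · cases hx
  · rcases List.mem_map.1 hx with ⟨out, hout, rfl⟩
    unfold pvOuts at hout
    cases hk : PySem.Dict.get? (PySem.Dict.mk locations) (s.1 * s.2) with
    | none => rw [hk] at hout; cases hout
    | some outs =>
      rw [hk] at hout
      have hmem : (s.1 * s.2, outs) ∈ (PySem.Dict.mk locations).items :=
        PySem.Dict.mem_items_of_get?_eq_some _ hk
      have hmem' : (s.1 * s.2, outs) ∈ locations := hmem
      refine List.mem_cons_of_mem _ (List.mem_flatMap.2 ⟨(s.1 * s.2, outs), hmem', ?_⟩)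
      exact List.mem_map.2 ⟨out, hout, rfl⟩

theorem pv_cl_subset_univ (row : Int) (col : Int) (graph : List (List Int))
    (locations : List (Int × List (List Int))) (seeds : List (Int × Int))
    (hseed : seeds ⊆ pvUniv row col locations) (n : Nat) :
    pvCl graph locations n seeds ⊆ pvUniv row col locations :=
  pv_cl_subset_of_closed graph locations _ seeds hseed
    (fun s _ => pv_kids_subset_univ row col graph locations s) n

-- length comparisons for Nodup subset lists
theorem pv_le_length {α : Type} [DecidableEq α] {l₁ l₂ : List α} (h : l₁.Nodup) (hs : l₁ ⊆ l₂) :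
    l₁.length ≤ l₂.length :=
  (h.subperm hs).length_le

theorem pv_lt_length {α : Type} [DecidableEq α] {l₁ l₂ : List α} (h : l₁.Nodup) (hs : l₁ ⊆ l₂)
    (x : α) (hx2 : x ∈ l₂) (hx1 : x ∉ l₁) : l₁.length < l₂.length := by
  have hsub : l₁ ⊆ l₂.erase x := by
    intro y hy
    have hne : y ≠ x := fun he => hx1 (he ▸ hy)
    exact (List.mem_erase_of_ne hne).2 (hs hy)
  have h1 : l₁.length ≤ (l₂.erase x).length := pv_le_length h hsub
  have h2 : (l₂.erase x).length + 1 = l₂.length := List.length_erase_add_one hx2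
  omega

-- the step is determined by the SET of states
theorem pv_step_congr (graph : List (List Int)) (locations : List (Int × List (List Int)))
    (S T : List (Int × Int)) (h : ∀ x, x ∈ S ↔ x ∈ T) (x : Int × Int) :
    x ∈ pvStep graph locations S ↔ x ∈ pvStep graph locations T := by
  rw [pv_mem_step, pv_mem_step]
  constructor
  · rintro (hx | ⟨s, hs, hk⟩)
    · exact Or.inl ((h x).1 hx)
    · exact Or.inr ⟨s, (h s).1 hs, hk⟩
  · rintro (hx | ⟨s, hs, hk⟩)
    · exact Or.inl ((h x).2 hx)
    · exact Or.inr ⟨s, (h s).2 hs, hk⟩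

theorem pv_fixed_after (graph : List (List Int)) (locations : List (Int × List (List Int)))
    (seeds : List (Int × Int)) (k : Nat)
    (hfix : ∀ x, x ∈ pvCl graph locations (k + 1) seeds ↔ x ∈ pvCl graph locations k seeds) :
    ∀ m, k ≤ m → ∀ x, x ∈ pvCl graph locations m seeds ↔ x ∈ pvCl graph locations k seeds := by
  intro m
  induction m with
  | zero => intro hm x; have : k = 0 := Nat.le_zero.1 hm; rw [this]
  | succ m ih =>
    intro hm x
    rcases Nat.lt_or_ge k (m + 1) with hlt | hge
    · have hkm : k ≤ m := Nat.lt_succ_iff.1 hlt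
      have hstep : x ∈ pvCl graph locations (m + 1) seeds ↔ x ∈ pvCl graph locations (k + 1) seeds :=
        pv_step_congr graph locations _ _ (ih hkm) x
      exact hstep.trans (hfix x)
    · have : k = m + 1 := Nat.le_antisymm hm hge
      rw [this]

-- after pvN iterations the closure is children-closed (pigeonhole on Nodup lengths)
theorem pv_cl_closed (row : Int) (col : Int) (graph : List (List Int))
    (locations : List (Int × List (List Int))) (seeds : List (Int × Int))
    (hseed : seeds ⊆ pvUniv row col locations) :
    ∀ s ∈ pvCl graph locations (pvN row col locations) seeds,
      pvKids graph locations s ⊆ pvCl graph locations (pvN row col locations) seeds := by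
  have hfixex : ∃ k < pvN row col locations, ∀ x, x ∈ pvCl graph locations (k + 1) seeds ↔ x ∈ pvCl graph locations k seeds := by
    by_contra hno
    push Not at hno
    have hgrow : ∀ k, k ≤ pvN row col locations → k ≤ (pvCl graph locations k seeds).length := by
      intro k
      induction k with
      | zero => intro _; exact Nat.zero_le _
      | succ k ih =>
        intro hk
        have hkN : k < pvN row col locations := hk
        obtain ⟨x, hxne⟩ := hno k hkN
        have hsub := pv_cl_subset_succ graph locations k seeds
        have hx1 : x ∈ pvCl graph locations (k + 1) seeds ∧ x ∉ pvCl graph locations k seeds := by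
          rcases hxne with ⟨h1, h2⟩ | ⟨h1, h2⟩
          · exact ⟨h1, h2⟩
          · exact absurd (hsub h2) h1
        have hlt := pv_lt_length (pv_cl_nodup graph locations k seeds) hsub x hx1.1 hx1.2
        have := ih (Nat.le_of_lt hkN)
        omega
    have hNlen := hgrow (pvN row col locations) (Nat.le_refl _)
    have hbound : (pvCl graph locations (pvN row col locations) seeds).length ≤ (pvUniv row col locations).length :=
      pv_le_length (pv_cl_nodup graph locations _ seeds)
        (pv_cl_subset_univ row col graph locations seeds hseed _)
    unfold pvN at hNlen hbound
    omega
  obtain ⟨k, hkN, hfix⟩ := hfixex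
  intro s hs x hx
  have hsk : s ∈ pvCl graph locations k seeds :=
    (pv_fixed_after graph locations seeds k hfix (pvN row col locations) (Nat.le_of_lt hkN) s).1 hs
  have hxk1 : x ∈ pvCl graph locations (k + 1) seeds :=
    (pv_mem_step graph locations _ x).2 (Or.inr ⟨s, hsk, hx⟩)
  exact (pv_fixed_after graph locations seeds k hfix (pvN row col locations) (Nat.le_of_lt hkN) x).2 ((hfix x).1 hxk1)

-- reachability characterization: membership in the bounded closure IS reflexive-transitive reachability
-- (these lemmas are cited by the Decidable instance of Pre_ below, so they live here)
def pvEdge (graph : List (List Int)) (locations : List (Int × List (List Int))) (a b : Int × Int) : Prop :=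
  b ∈ pvKids graph locations a

theorem pv_mem_cl_iff (row : Int) (col : Int) (graph : List (List Int))
    (locations : List (Int × List (List Int))) (seeds : List (Int × Int))
    (hseed : seeds ⊆ pvUniv row col locations) (b : Int × Int) :
    b ∈ pvCl graph locations (pvN row col locations) seeds ↔
      ∃ a ∈ seeds, Relation.ReflTransGen (pvEdge graph locations) a b := by
  constructor
  · have aux : ∀ n x, x ∈ pvCl graph locations n seeds →
        ∃ a ∈ seeds, Relation.ReflTransGen (pvEdge graph locations) a x := by
      intro n
      induction n with
      | zero => intro x hx; exact ⟨x, List.mem_dedup.1 hx, Relation.ReflTransGen.refl⟩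
      | succ n ih =>
        intro x hx
        rcases (pv_mem_step graph locations _ x).1 hx with h | ⟨t, ht, hk⟩
        · exact ih x h
        · obtain ⟨a, ha, hr⟩ := ih t ht
          exact ⟨a, ha, hr.tail hk⟩
    exact aux _ b
  · rintro ⟨a, ha, hrtg⟩
    induction hrtg with
    | refl => exact pv_seeds_subset_cl graph locations _ seeds ha
    | tail _ he ih =>
      exact pv_cl_closed row col graph locations seeds hseed _ ih he

-- ===== PRECONDITION & SPEC =====
-- Pre_ excludes (a) duplicate keys in the association list, which no Python dict can express; and, over the
-- states REACHABLE from the start only, (b) the states where A raises IndexError (the empty-graph guard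
-- reading graph[0], and output pairs of length < 2) and (c) cycles, on which A's unbounded recursion
-- overflows the stack; because A's `or` short-circuits as soon as some branch escapes, (b) and (c) also
-- exclude some inputs on which A returns (see cites).
def Pre_doCheckCanEscape (row : Int) (col : Int) (graph : List (List Int)) (locations : List (Int × List (List Int))) : Prop :=
  (locations.map Prod.fst).Nodup ∧
  ∀ s, Relation.ReflTransGen (pvEdge graph locations) (row, col) s →
    (graph = [] → ¬(s.1 = 0 ∧ 0 ≤ s.2)) ∧
    (pvKids graph locations s ≠ [] → ∀ out ∈ pvOuts locations s, 2 ≤ out.length) ∧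
    ¬∃ t, pvEdge graph locations s t ∧ Relation.ReflTransGen (pvEdge graph locations) t s

-- Pre_ is equivalent to a bounded-closure computation, which makes it decidable
theorem pv_pre_iff (row : Int) (col : Int) (graph : List (List Int)) (locations : List (Int × List (List Int))) :
    Pre_doCheckCanEscape row col graph locations ↔
    ((locations.map Prod.fst).Nodup ∧
     ∀ s ∈ pvReach row col graph locations,
       (graph = [] → ¬(s.1 = 0 ∧ 0 ≤ s.2)) ∧
       (pvKids graph locations s ≠ [] → ∀ out ∈ pvOuts locations s, 2 ≤ out.length) ∧
       s ∉ pvCl graph locations (pvN row col locations) (pvKids graph locations s)) := by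
  have hstart : [(row, col)] ⊆ pvUniv row col locations := by
    intro y hy; rcases List.mem_singleton.1 hy with rfl; exact List.mem_cons_self
  have hreach_iff : ∀ s, s ∈ pvReach row col graph locations ↔
      Relation.ReflTransGen (pvEdge graph locations) (row, col) s := by
    intro s
    rw [pvReach, pv_mem_cl_iff row col graph locations _ hstart]
    constructor
    · rintro ⟨a, ha, hr⟩; rcases List.mem_singleton.1 ha with rfl; exact hr
    · intro hr; exact ⟨(row, col), List.mem_singleton.2 rfl, hr⟩
  have hcyc_iff : ∀ s, (s ∈ pvCl graph locations (pvN row col locations) (pvKids graph locations s)) ↔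
      ∃ t, pvEdge graph locations s t ∧ Relation.ReflTransGen (pvEdge graph locations) t s := by
    intro s
    rw [pv_mem_cl_iff row col graph locations _ (pv_kids_subset_univ row col graph locations s)]
    constructor
    · rintro ⟨t, ht, hr⟩; exact ⟨t, ht, hr⟩
    · rintro ⟨t, ht, hr⟩; exact ⟨t, ht, hr⟩
  constructor
  · rintro ⟨hnd, h⟩
    refine ⟨hnd, fun s hs => ?_⟩
    obtain ⟨h1, h2, h3⟩ := h s ((hreach_iff s).1 hs)
    exact ⟨h1, h2, fun hc => h3 ((hcyc_iff s).1 hc)⟩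
  · rintro ⟨hnd, h⟩
    refine ⟨hnd, fun s hs => ?_⟩
    obtain ⟨h1, h2, h3⟩ := h s ((hreach_iff s).2 hs)
    exact ⟨h1, h2, fun hc => h3 ((hcyc_iff s).2 hc)⟩

instance (row : Int) (col : Int) (graph : List (List Int)) (locations : List (Int × List (List Int))) : Decidable (Pre_doCheckCanEscape row col graph locations) :=
  decidable_of_iff _ (pv_pre_iff row col graph locations).symm

def pvWitness_doCheckCanEscape : Int × Int × List (List Int) × (List (Int × List (List Int))) :=
  (2, 3, [[0, 0, 0], [0, 0, 0]], [(6, [[1, 2]])])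

def Spec_doCheckCanEscape (row : Int) (col : Int) (graph : List (List Int)) (locations : List (Int × List (List Int))) (out : Bool) : Prop := out = doCheckCanEscape_alt row col graph locations
instance (row : Int) (col : Int) (graph : List (List Int)) (locations : List (Int × List (List Int))) (out : Bool) : Decidable (Spec_doCheckCanEscape row col graph locations out) := by unfold Spec_doCheckCanEscape; infer_instance

-- ===== CLAIM (what is proved, stated in full; the proofs are below) =====
def Claim_equal_doCheckCanEscape : Prop := ∀ (row : Int) (col : Int) (graph : List (List Int)) (locations : List (Int × List (List Int))), Dom_doCheckCanEscape row col graph locations → Pre_doCheckCanEscape row col graph locations → Spec_doCheckCanEscape row col graph locations (doCheckCanEscape row col graph locations)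

-- ===== LEMMAS AND PROOFS =====

-- depth measure: size of the closure from a single state
def pvMu (row : Int) (col : Int) (graph : List (List Int)) (locations : List (Int × List (List Int)))
    (s : Int × Int) : Nat :=
  (pvCl graph locations (pvN row col locations) [s]).length

-- the measure drops along every child edge of an acyclic reachable state
theorem pv_mu_child_lt (row : Int) (col : Int) (graph : List (List Int))
    (locations : List (Int × List (List Int))) (s : Int × Int)
    (hsu : s ∈ pvUniv row col locations)
    (hacyc : s ∉ pvCl graph locations (pvN row col locations) (pvKids graph locations s))
    (t : Int × Int) (ht : t ∈ pvKids graph locations s) :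
    pvMu row col graph locations t < pvMu row col graph locations s := by
  have hsingle : [s] ⊆ pvUniv row col locations := by
    intro y hy; rcases List.mem_singleton.1 hy with rfl; exact hsu
  have hclosed := pv_cl_closed row col graph locations [s] hsingle
  have hss : s ∈ pvCl graph locations (pvN row col locations) [s] :=
    pv_seeds_subset_cl graph locations _ [s] (List.mem_singleton.2 rfl)
  have hts : t ∈ pvCl graph locations (pvN row col locations) [s] := hclosed s hss ht
  have hsubset : pvCl graph locations (pvN row col locations) [t] ⊆
      pvCl graph locations (pvN row col locations) [s] := by
    refine pv_cl_subset_of_closed graph locations _ [t] ?_ hclosed _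
    intro y hy; rcases List.mem_singleton.1 hy with rfl; exact hts
  have hnotin : s ∉ pvCl graph locations (pvN row col locations) [t] := by
    intro hsin
    apply hacyc
    have hkidsu : pvKids graph locations s ⊆ pvUniv row col locations :=
      pv_kids_subset_univ row col graph locations s
    have hclosedk := pv_cl_closed row col graph locations (pvKids graph locations s) hkidsu
    have hsubk : pvCl graph locations (pvN row col locations) [t] ⊆
        pvCl graph locations (pvN row col locations) (pvKids graph locations s) := by
      refine pv_cl_subset_of_closed graph locations _ [t] ?_ hclosedk _
      intro y hy; rcases List.mem_singleton.1 hy with rfl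
      exact pv_seeds_subset_cl graph locations _ _ ht
    exact hsubk hsin
  exact pv_lt_length (pv_cl_nodup graph locations _ [t]) hsubset s hss hnotin

-- the measure is bounded by the universe size for universe states
theorem pv_mu_le (row : Int) (col : Int) (graph : List (List Int))
    (locations : List (Int × List (List Int))) (s : Int × Int)
    (hsu : s ∈ pvUniv row col locations) :
    pvMu row col graph locations s ≤ (pvUniv row col locations).length := by
  refine pv_le_length (pv_cl_nodup graph locations _ [s]) ?_
  refine pv_cl_subset_univ row col graph locations [s] ?_ _
  intro y hy; rcases List.mem_singleton.1 hy with rfl; exact hsu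

theorem pv_reach_subset_univ (row : Int) (col : Int) (graph : List (List Int))
    (locations : List (Int × List (List Int))) :
    pvReach row col graph locations ⊆ pvUniv row col locations := by
  refine pv_cl_subset_univ row col graph locations _ ?_ _
  intro y hy; rcases List.mem_singleton.1 hy with rfl; exact List.mem_cons_self

theorem pv_reach_closed (row : Int) (col : Int) (graph : List (List Int))
    (locations : List (Int × List (List Int))) :
    ∀ s ∈ pvReach row col graph locations, pvKids graph locations s ⊆ pvReach row col graph locations := by
  refine pv_cl_closed row col graph locations _ ?_
  intro y hy; rcases List.mem_singleton.1 hy with rfl; exact List.mem_cons_self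

theorem pv_start_mem_reach (row : Int) (col : Int) (graph : List (List Int))
    (locations : List (Int × List (List Int))) :
    (row, col) ∈ pvReach row col graph locations :=
  pv_seeds_subset_cl graph locations _ _ (List.mem_singleton.2 rfl)

-- A's limit value (the fuel pvN is enough within Pre_)
def pvVal (row : Int) (col : Int) (graph : List (List Int)) (locations : List (Int × List (List Int)))
    (r c : Int) : Bool :=
  pvGoA graph locations (pvN row col locations) r c

-- membership-aware congruence for List.any
theorem pv_any_congr_mem {α : Type} (l : List α) (p q : α → Bool) (h : ∀ x ∈ l, p x = q x) :
    l.any p = l.any q := by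
  induction l with
  | nil => rfl
  | cons a l ih =>
    simp only [List.any_cons, h a (List.mem_cons_self),
      ih (fun x hx => h x (List.mem_cons_of_mem _ hx))]

-- an expanding state's children list is exactly pvKids
theorem pv_kids_eq (graph : List (List Int)) (locations : List (Int × List (List Int)))
    (r c : Int) (outs : List (List Int))
    (hb : pvBlocked graph r c = false) (hr : r ≠ 1) (hc : c ≠ 1)
    (hk : PySem.Dict.get? (PySem.Dict.mk locations) (r * c) = some outs) :
    pvKids graph locations (r, c) = outs.map pvChildPair := by
  unfold pvKids pvOuts
  simp [hb, hr, hc, hk]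

-- L1: with enough fuel (anything above the measure), pvGoA's value is fuel-independent on reachable states
theorem pvGoA_stable (row : Int) (col : Int) (graph : List (List Int))
    (locations : List (Int × List (List Int)))
    (hP : ∀ s ∈ pvReach row col graph locations,
      s ∉ pvCl graph locations (pvN row col locations) (pvKids graph locations s)) :
    ∀ fuel₁ fuel₂ r c, (r, c) ∈ pvReach row col graph locations →
      pvMu row col graph locations (r, c) < fuel₁ → pvMu row col graph locations (r, c) < fuel₂ →
      pvGoA graph locations fuel₁ r c = pvGoA graph locations fuel₂ r c := by
  intro fuel₁
  induction fuel₁ with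
  | zero => intro fuel₂ r c _ h1 _; omega
  | succ f1 ih =>
    intro fuel₂ r c hreach h1 h2
    cases fuel₂ with
    | zero => omega
    | succ f2 =>
      simp only [pvGoA]
      by_cases hb : pvBlocked graph r c = true
      · simp [hb]
      · rw [Bool.not_eq_true] at hb
        simp only [hb, Bool.false_eq_true, if_false]
        by_cases hesc : r = 1 ∨ c = 1
        · simp [hesc]
        · simp only [hesc, if_false]
          rw [not_or] at hesc
          obtain ⟨hr, hc⟩ := hesc
          cases hk : PySem.Dict.get? (PySem.Dict.mk locations) (r * c) with
          | none => rfl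
          | some outs =>
            have hkids := pv_kids_eq graph locations r c outs hb hr hc hk
            refine pv_any_congr_mem _ _ _ (fun out hout => ?_)
            have htk : (pvOut0 out, pvOut1 out) ∈ pvKids graph locations (r, c) := by
              rw [hkids]; exact List.mem_map.2 ⟨out, hout, rfl⟩
            have htreach : (pvOut0 out, pvOut1 out) ∈ pvReach row col graph locations :=
              pv_reach_closed row col graph locations (r, c) hreach htk
            have hchild := pv_mu_child_lt row col graph locations (r, c)
              (pv_reach_subset_univ row col graph locations hreach)
              (hP (r, c) hreach) _ htk
            exact ih f2 (pvOut0 out) (pvOut1 out) htreach (by omega) (by omega)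

def pvMemoOK (row : Int) (col : Int) (graph : List (List Int))
    (locations : List (Int × List (List Int))) (m : PySem.Dict (Int × Int) Bool) : Prop :=
  ∀ q b, PySem.Dict.get? m q = some b → b = pvVal row col graph locations q.1 q.2

-- L2: memoized DFS computes A's limit value and keeps the memo correct
theorem pvSolve_ok (row : Int) (col : Int) (graph : List (List Int))
    (locations : List (Int × List (List Int)))
    (hP : ∀ s ∈ pvReach row col graph locations,
      s ∉ pvCl graph locations (pvN row col locations) (pvKids graph locations s)) :
    ∀ fuel r c m, (r, c) ∈ pvReach row col graph locations →
      pvMu row col graph locations (r, c) < fuel → pvMemoOK row col graph locations m →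
      (pvSolve graph locations fuel r c m).1 = pvVal row col graph locations r c ∧
      pvMemoOK row col graph locations (pvSolve graph locations fuel r c m).2 := by
  intro fuel
  induction fuel with
  | zero => intro r c m _ h1 _; omega
  | succ f ih =>
    intro r c m hreach h1 hm
    simp only [pvSolve]
    cases hget : PySem.Dict.get? m (r, c) with
    | some b =>
      exact ⟨hm (r, c) b hget, by simpa [pvSolve, hget] using hm⟩
    | none =>
      by_cases hb : pvBlocked graph r c = true
      · have hval : pvVal row col graph locations r c = false := by
          unfold pvVal pvN
          simp [pvGoA, hb]
        refine ⟨by simp [hb, hval], ?_⟩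
        intro q b hq
        simp only [hb, if_true] at hq ⊢
        rw [PySem.Dict.get?_insert] at hq
        split at hq
        · next heq => cases hq; subst heq; simp [hval]
        · exact hm q b hq
      · rw [Bool.not_eq_true] at hb
        by_cases hesc : r = 1 ∨ c = 1
        · have hval : pvVal row col graph locations r c = true := by
            unfold pvVal pvN
            simp [pvGoA, hb, hesc]
          refine ⟨by simp [hb, hesc, hval], ?_⟩
          intro q b hq
          simp only [hb, Bool.false_eq_true, if_false, hesc, if_true] at hq ⊢
          rw [PySem.Dict.get?_insert] at hq
          split at hq
          · next heq => cases hq; subst heq; simp [hval]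
          · exact hm q b hq
        · rw [not_or] at hesc
          obtain ⟨hr, hc⟩ := hesc
          cases hk : PySem.Dict.get? (PySem.Dict.mk locations) (r * c) with
          | none =>
            have hval : pvVal row col graph locations r c = false := by
              unfold pvVal pvN
              simp [pvGoA, hb, hr, hc, hk]
            refine ⟨by simp [hb, hr, hc, pvSolveAny, hval], ?_⟩
            intro q b hq
            simp only [hb, Bool.false_eq_true, if_false, hr, hc] at hq ⊢
            simp only [or_self, if_false, Option.getD_none, pvSolveAny] at hq
            rw [PySem.Dict.get?_insert] at hq
            split at hq
            · next heq => cases hq; subst heq; simp [hval]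
            · exact hm q b hq
          | some outs =>
            have hkids := pv_kids_eq graph locations r c outs hb hr hc hk
            have hchildlt : ∀ out ∈ outs,
                (pvOut0 out, pvOut1 out) ∈ pvReach row col graph locations ∧
                pvMu row col graph locations (pvOut0 out, pvOut1 out) < f := by
              intro out hout
              have htk : (pvOut0 out, pvOut1 out) ∈ pvKids graph locations (r, c) := by
                rw [hkids]; exact List.mem_map.2 ⟨out, hout, rfl⟩
              refine ⟨pv_reach_closed row col graph locations (r, c) hreach htk, ?_⟩
              have := pv_mu_child_lt row col graph locations (r, c)
                (pv_reach_subset_univ row col graph locations hreach)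
                (hP (r, c) hreach) _ htk
              omega
            have hinner : ∀ (outs' : List (List Int)),
                (∀ out ∈ outs', (pvOut0 out, pvOut1 out) ∈ pvReach row col graph locations ∧
                  pvMu row col graph locations (pvOut0 out, pvOut1 out) < f) →
                ∀ m', pvMemoOK row col graph locations m' →
                (pvSolveAny graph locations f outs' m').1 =
                  outs'.any (fun out => pvVal row col graph locations (pvOut0 out) (pvOut1 out)) ∧
                pvMemoOK row col graph locations (pvSolveAny graph locations f outs' m').2 := by
              intro outs'
              induction outs' with
              | nil => intro _ m' hm'; exact ⟨by simp [pvSolveAny], by simpa [pvSolveAny] using hm'⟩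
              | cons out rest ihr =>
                intro hlt m' hm'
                have hol := hlt out (List.mem_cons_self)
                have hhead := ih (pvOut0 out) (pvOut1 out) m' hol.1 hol.2 hm'
                by_cases hp : (pvSolve graph locations f (pvOut0 out) (pvOut1 out) m').1 = true
                · refine ⟨?_, ?_⟩
                  · simp [pvSolveAny, hp, ← hhead.1]
                  · simp only [pvSolveAny, hp, if_true]
                    exact hhead.2
                · rw [Bool.not_eq_true] at hp
                  have hrest := ihr (fun o ho => hlt o (List.mem_cons_of_mem _ ho)) _ hhead.2
                  refine ⟨?_, ?_⟩
                  · simp only [pvSolveAny, hp, Bool.false_eq_true, if_false, List.any_cons]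
                    rw [hrest.1, ← hhead.1, hp]
                    simp
                  · simp only [pvSolveAny, hp, Bool.false_eq_true, if_false]
                    exact hrest.2
            have hmain := hinner outs hchildlt m hm
            -- A's limit value unfolds to the same `any` over children
            have hval : pvVal row col graph locations r c =
                outs.any (fun out => pvVal row col graph locations (pvOut0 out) (pvOut1 out)) := by
              show pvGoA graph locations (pvN row col locations) r c = _
              have hNpos : ∃ n, pvN row col locations = n + 1 := ⟨(pvUniv row col locations).length, rfl⟩
              obtain ⟨n, hn⟩ := hNpos
              rw [hn]
              simp only [pvGoA, hb, Bool.false_eq_true, if_false, hr, hc, or_self, hk]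
              refine pv_any_congr_mem _ _ _ (fun out hout => ?_)
              have htk : (pvOut0 out, pvOut1 out) ∈ pvKids graph locations (r, c) := by
                rw [hkids]; exact List.mem_map.2 ⟨out, hout, rfl⟩
              have htreach : (pvOut0 out, pvOut1 out) ∈ pvReach row col graph locations :=
                pv_reach_closed row col graph locations (r, c) hreach htk
              have hchild := pv_mu_child_lt row col graph locations (r, c)
                (pv_reach_subset_univ row col graph locations hreach)
                (hP (r, c) hreach) _ htk
              have hmuc := pv_mu_le row col graph locations (r, c)
                (pv_reach_subset_univ row col graph locations hreach)
              have : pvGoA graph locations n (pvOut0 out) (pvOut1 out) =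
                  pvGoA graph locations (pvN row col locations) (pvOut0 out) (pvOut1 out) := by
                refine pvGoA_stable row col graph locations hP n (pvN row col locations)
                  (pvOut0 out) (pvOut1 out) htreach ?_ ?_
                · unfold pvN at hn; omega
                · unfold pvN; omega
              rw [this]
              rfl
            refine ⟨?_, ?_⟩
            · simp only [hb, Bool.false_eq_true, if_false, hr, hc, or_self, Option.getD_some]
              rw [hmain.1, hval]
            · intro q b hq
              simp only [hb, Bool.false_eq_true, if_false, hr, hc, or_self, Option.getD_some] at hq
              rw [PySem.Dict.get?_insert] at hq
              split at hq
              · next heq =>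
                cases hq; subst heq
                rw [hmain.1, hval]
              · exact hmain.2 q b hq

-- ===== VERDICT (by name: the statement is the Claim_ definition above) =====
theorem doCheckCanEscape_spec : Claim_equal_doCheckCanEscape := by
  intro row col graph locations _ hpre
  obtain ⟨-, hcond⟩ := (pv_pre_iff row col graph locations).1 hpre
  have hP : ∀ s ∈ pvReach row col graph locations,
      s ∉ pvCl graph locations (pvN row col locations) (pvKids graph locations s) :=
    fun s hs => (hcond s hs).2.2
  show doCheckCanEscape row col graph locations = doCheckCanEscape_alt row col graph locations
  have hmemo : pvMemoOK row col graph locations PySem.Dict.empty := by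
    intro q b hq
    simp [PySem.Dict.get?_empty] at hq
  have hstart := pv_start_mem_reach row col graph locations
  have hmu := pv_mu_le row col graph locations (row, col) List.mem_cons_self
  have h := pvSolve_ok row col graph locations hP (pvN row col locations) row col
    PySem.Dict.empty hstart (by unfold pvN; omega) hmemo
  unfold doCheckCanEscape doCheckCanEscape_alt
  rw [h.1]
  rfl
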